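-- pv_equiv track=rewrite | github.com/sarbeshtiwari/arc-agi-3 | environment_files/ft02/ft02.py | _grid_positions
-- ===== SOURCE A (Python) =====
-- from typing import Any, Dict, List, Optional, Tuple
--
-- _CELL = 6
--
-- _GAP = 1
--
-- _GRID_PX = 64
--
-- _Y_PAD = 4
--
-- def _grid_positions(dim: int) -> List[Tuple[int, int]]:
--     total = _CELL * dim + _GAP * (dim - 1)
--     ox = (_GRID_PX - total) // 2
--     oy = (_GRID_PX - total) // 2 + _Y_PAD
--     return [
--         (ox + c * (_CELL + _GAP), oy + r * (_CELL + _GAP))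
--         for r in range(dim)
--         for c in range(dim)
--     ]
-- ===== SOURCE B (Python) =====
-- _CELL = 6
-- _GAP = 1
-- _GRID_PX = 64
-- _Y_PAD = 4
--
-- def _grid_positions(dim):
--     step = _CELL + _GAP
--     total = step * dim - _GAP
--     ox = (_GRID_PX - total) // 2
--     oy = ox + _Y_PAD
--     out = []
--     x, y, c = ox, oy, 0
--     n = dim * dim if dim > 0 else 0
--     for _ in range(n):
--         out.append((x, y))
--         c += 1
--         if c == dim:
--             x, y, c = ox, y + step, 0
--         else:
--             x += step
--     return out
-- ===== Notes on version B (the rewrite author's own statement) =====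
-- stated objective: alternative
-- what changed: Replaces the double comprehension with per-cell multiplication by a single-pass state machine: one loop over dim*dim iterations that advances the current (x,y) cursor additively by the step and wraps back to the row start when the in-row counter reaches dim.
import Mathlib
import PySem

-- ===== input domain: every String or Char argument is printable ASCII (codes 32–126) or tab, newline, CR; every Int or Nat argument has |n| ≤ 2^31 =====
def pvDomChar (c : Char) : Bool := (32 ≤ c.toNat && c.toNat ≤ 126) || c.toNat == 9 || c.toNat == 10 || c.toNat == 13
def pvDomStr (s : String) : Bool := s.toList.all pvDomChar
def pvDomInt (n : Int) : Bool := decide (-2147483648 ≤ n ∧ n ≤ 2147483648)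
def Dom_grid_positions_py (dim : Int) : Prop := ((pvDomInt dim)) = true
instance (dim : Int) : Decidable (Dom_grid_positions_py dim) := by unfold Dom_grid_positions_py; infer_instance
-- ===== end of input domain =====

-- B replaces the double comprehension with a single-pass cursor state machine (additive stepping with row wraparound); alternative decomposition, same cost.

-- ===== PORT A =====
def grid_positions_py (dim : Int) : List (Int × Int) :=
  let total : Int := 6 * dim + 1 * (dim - 1)
  let ox : Int := PySem.Int.floordiv (64 - total) 2
  let oy : Int := PySem.Int.floordiv (64 - total) 2 + 4
  (PySem.List.pyRange 0 dim 1).flatMap (fun r =>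
    (PySem.List.pyRange 0 dim 1).map (fun c => (ox + c * (6 + 1), oy + r * (6 + 1))))

-- ===== PORT B =====
def grid_positions_py_alt (dim : Int) : List (Int × Int) :=
  let step : Int := 6 + 1
  let total : Int := step * dim - 1
  let ox : Int := PySem.Int.floordiv (64 - total) 2
  let oy : Int := ox + 4
  let n : Int := if dim > 0 then dim * dim else 0
  let res := (PySem.List.pyRange 0 n 1).foldl
    (fun (st : List (Int × Int) × Int × Int × Int) _ =>
      let out := st.1 ++ [(st.2.1, st.2.2.1)]
      let c := st.2.2.2 + 1
      if c = dim then (out, ox, st.2.2.1 + step, 0)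
      else (out, st.2.1 + step, st.2.2.1, c))
    ([], ox, oy, 0)
  res.1

-- ===== PRECONDITION & SPEC =====
def Spec_grid_positions_py (dim : Int) (out : List (Int × Int)) : Prop := out = grid_positions_py_alt dim
instance (dim : Int) (out : List (Int × Int)) : Decidable (Spec_grid_positions_py dim out) := by unfold Spec_grid_positions_py; infer_instance

-- ===== CLAIM (what is proved, stated in full; the proofs are below) =====
def Claim_equal_grid_positions_py : Prop := ∀ (dim : Int), Dom_grid_positions_py dim → Spec_grid_positions_py dim (grid_positions_py dim)

-- ===== LEMMAS AND PROOFS =====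

-- Pure generator describing what B's loop emits from a given cursor state.
def pvGen (dim ox : Int) : Nat → Int → Int → Int → List (Int × Int)
  | 0, _, _, _ => []
  | n+1, x, y, c =>
      (x, y) :: (if c + 1 = dim then pvGen dim ox n ox (y + 7) 0
                 else pvGen dim ox n (x + 7) y (c + 1))

-- B's foldl equals the generator (the loop body ignores the range element).
theorem pvFoldl_gen (dim ox : Int) (l : List Int) :
    ∀ (acc : List (Int × Int)) (x y c : Int),
    (l.foldl
      (fun (st : List (Int × Int) × Int × Int × Int) _ =>
        if st.2.2.2 + 1 = dim then (st.1 ++ [(st.2.1, st.2.2.1)], ox, st.2.2.1 + 7, 0)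
        else (st.1 ++ [(st.2.1, st.2.2.1)], st.2.1 + 7, st.2.2.1, st.2.2.2 + 1))
      (acc, x, y, c)).1 = acc ++ pvGen dim ox l.length x y c := by
  induction l with
  | nil => intro acc x y c; simp [pvGen]
  | cons h t ih =>
      intro acc x y c
      simp only [List.foldl_cons, List.length_cons, pvGen]
      by_cases hc : c + 1 = dim
      · simp only [hc, ih]; simp
      · simp only [if_neg hc, ih]; simp

-- One full row: starting at column c0 with j = d - c0 cells left in the row.
theorem pvGen_row (d : Nat) (ox : Int) :
    ∀ (j : Nat) (m : Nat) (y : Int) (c0 : Nat), 0 < j → c0 + j = d →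
    pvGen (d : Int) ox (j + m) (ox + (c0 : Int) * 7) y (c0 : Int) =
      (List.range j).map (fun i : Nat => (ox + ((c0 : Int) + (i : Int)) * 7, y))
        ++ pvGen (d : Int) ox m ox (y + 7) 0 := by
  intro j
  induction j with
  | zero => intro m y c0 h; omega
  | succ j ih =>
      intro m y c0 _ hcd
      simp only [Nat.succ_add, pvGen]
      by_cases hj : j = 0
      · subst hj
        have hwrap : (c0 : Int) + 1 = (d : Int) := by exact_mod_cast hcd
        rw [if_pos hwrap]
        simp
      · have hne : (c0 : Int) + 1 ≠ (d : Int) := by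
          intro h
          have : c0 + 1 = d := by exact_mod_cast h
          omega
        rw [if_neg hne]
        have h1 : ox + (c0 : Int) * 7 + 7 = ox + ((c0 + 1 : Nat) : Int) * 7 := by
          push_cast; ring
        have h2 : (c0 : Int) + 1 = ((c0 + 1 : Nat) : Int) := by push_cast; ring
        rw [h1, h2, ih m y (c0 + 1) (by omega) (by omega)]
        rw [List.range_succ_eq_map, List.map_cons, List.map_map]
        simp only [List.cons_append]
        congr 2
        · apply List.map_congr_left
          intro i _
          simp only [Function.comp_apply, Prod.mk.injEq]
          refine ⟨by push_cast; ring, trivial⟩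

-- k rows starting at a fresh row: the generator produces A-shaped rows.
theorem pvGen_rows (d : Nat) (ox : Int) (hd : 0 < d) :
    ∀ (k : Nat) (y : Int),
    pvGen (d : Int) ox (d * k) ox y 0 =
      (List.range k).flatMap (fun r : Nat =>
        (List.range d).map (fun c : Nat => (ox + (c : Int) * 7, y + (r : Int) * 7))) := by
  intro k
  induction k with
  | zero => intro y; simp [pvGen]
  | succ k ih =>
      intro y
      have hsplit : d * (k + 1) = d + d * k := by ring
      have hrow := pvGen_row d ox d (d * k) y 0 hd (by omega)
      simp only [Nat.cast_zero, zero_mul, add_zero, zero_add] at hrow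
      rw [hsplit, hrow, ih (y + 7)]
      rw [List.range_succ_eq_map, List.flatMap_cons, List.flatMap_map]
      congr 1
      · apply List.map_congr_left; intro c _; simp
      · apply List.flatMap_congr
        intro r _
        apply List.map_congr_left
        intro c _
        congr 1
        push_cast; ring

-- ===== VERDICT (by name: the statement is the Claim_ definition above) =====
theorem grid_positions_py_spec : Claim_equal_grid_positions_py := by
  intro dim _
  unfold Spec_grid_positions_py grid_positions_py grid_positions_py_alt
  by_cases hpos : dim > 0
  · dsimp only
    simp only [if_pos hpos, show (6:Int)+1 = 7 from rfl]
    obtain ⟨d, rfl⟩ : ∃ d : Nat, dim = (d : Int) :=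
      ⟨dim.toNat, (Int.toNat_of_nonneg (le_of_lt hpos)).symm⟩
    have hd : 0 < d := by exact_mod_cast hpos
    have hlen : (PySem.List.pyRange 0 ((d : Int) * d) 1).length = d * d := by
      rw [PySem.List.length_pyRange_one, sub_zero, ← Nat.cast_mul, Int.toNat_natCast]
    rw [pvFoldl_gen, hlen]
    have heq : (6 : Int) * d + 1 * ((d : Int) - 1) = 7 * (d : Int) - 1 := by ring
    rw [heq]
    set o : Int := PySem.Int.floordiv (64 - (7 * (d : Int) - 1)) 2 with ho
    rw [pvGen_rows d o hd d (o + 4)]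
    rw [PySem.List.pyRange_one]
    simp only [sub_zero, Int.toNat_natCast, List.flatMap_map, List.map_map, List.nil_append,
      zero_add]
    apply List.flatMap_congr
    intro r _
    apply List.map_congr_left
    intro c _
    rfl
  · dsimp only
    have hn : ¬ (dim > 0) := hpos
    simp only [if_neg hn]
    have hA : PySem.List.pyRange 0 dim 1 = [] :=
      PySem.List.pyRange_one_eq_nil (by omega)
    have hB : PySem.List.pyRange 0 0 1 = [] :=
      PySem.List.pyRange_one_eq_nil (by omega)
    rw [hA, hB]
    simp
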